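-- pv_equiv track=rewrite | github.com/sj1225/algorithm-study | 프로그래머스/0/120869. 외계어 사전/외계어 사전.py | solution
-- ===== SOURCE A (Python) =====
-- def solution(spell, dic):
--     answer = 2
--
--     tempSpell = ''.join(sorted(spell))
--
--     for d in dic:
--         temp = ''.join(sorted(d))
--
--         if temp == tempSpell:
--             answer = 1
--
--     return answer
-- ===== SOURCE B (Python) =====
-- def solution(spell, dic):
--     target = ''.join(sorted(spell))
--     n = len(target)
--     for d in dic:
--         if len(d) != n:
--             continue
--         cnt = {}
--         for c in d:
--             cnt[c] = cnt.get(c, 0) + 1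
--         if ''.join(c * cnt[c] for c in sorted(cnt)) == target:
--             return 1
--     return 2
-- ===== Notes on version B (the rewrite author's own statement) =====
-- stated objective: faster
-- what changed: B canonicalizes each candidate word by counting sort (a character-frequency dict expanded over its sorted distinct characters) instead of comparison-sorting the whole word, skips words of the wrong length without counting them, and returns early on the first match instead of folding over the whole dictionary.
import Mathlib
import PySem

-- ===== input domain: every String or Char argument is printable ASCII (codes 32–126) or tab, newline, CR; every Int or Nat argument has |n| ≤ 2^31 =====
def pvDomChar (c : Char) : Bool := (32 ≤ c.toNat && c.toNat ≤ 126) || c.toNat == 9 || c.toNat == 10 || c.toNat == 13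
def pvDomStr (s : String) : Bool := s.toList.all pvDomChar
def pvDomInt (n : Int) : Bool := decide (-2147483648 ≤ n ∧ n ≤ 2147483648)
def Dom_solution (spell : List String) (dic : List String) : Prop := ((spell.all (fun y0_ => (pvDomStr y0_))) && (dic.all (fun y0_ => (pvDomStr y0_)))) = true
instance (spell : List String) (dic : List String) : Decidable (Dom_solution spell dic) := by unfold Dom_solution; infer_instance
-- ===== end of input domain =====

-- B canonicalizes each word by counting sort (frequency dict expanded over sorted distinct
-- characters) instead of comparison-sorting it, skips words of the wrong length, and
-- returns early on the first match.

-- ===== PORT A =====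
-- ''.join(sorted(d)) on a string d: sorted(d) lists d's characters in nondecreasing order
-- (Python's 1-char strings compare as their code points), joined back into a string — exact.
def solution (spell : List String) (dic : List String) : Int :=
  let tempSpell : String := PySem.Str.join "" (PySem.List.sorted spell (fun x => x) false)
  dic.foldl (fun answer d =>
    let temp : String := String.ofList (PySem.List.sorted d.toList (fun c => c) false)
    if temp == tempSpell then 1 else answer) 2

-- ===== PORT B =====
-- cnt[c] = cnt.get(c, 0) + 1 over the characters of cs
def pvCount (cs : List Char) : PySem.Dict Char Int :=
  cs.foldl (fun d c => d.insert c (d.getD c 0 + 1)) PySem.Dict.empty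

-- ''.join(c * cnt[c] for c in sorted(cnt)): counting-sort expansion; Python's 'c * n'
-- repeats max(n,0) times, which is exactly List.replicate n.toNat for an Int n.
def pvCanon (cs : List Char) : List Char :=
  let cnt := pvCount cs
  (PySem.List.sorted cnt.keys (fun c => c) false).flatMap
    (fun c => List.replicate (cnt.getD c 0).toNat c)

-- 'for d in dic: if len(d) != n: continue; … if canon == target: return 1' then 'return 2'
def pvScan (target : List Char) : List String → Int
  | [] => 2
  | d :: rest =>
    if PySem.Str.len d ≠ PySem.List.len target then pvScan target rest
    else if pvCanon d.toList == target then 1 else pvScan target rest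

def solution_alt (spell : List String) (dic : List String) : Int :=
  let target : List Char := (PySem.Str.join "" (PySem.List.sorted spell (fun x => x) false)).toList
  pvScan target dic

-- ===== PRECONDITION & SPEC =====
def Spec_solution (spell : List String) (dic : List String) (out : Int) : Prop := out = solution_alt spell dic
instance (spell : List String) (dic : List String) (out : Int) : Decidable (Spec_solution spell dic out) := by unfold Spec_solution; infer_instance

-- ===== CLAIM (what is proved, stated in full; the proofs are below) =====
def Claim_equal_solution : Prop := ∀ (spell : List String) (dic : List String), Dom_solution spell dic → Spec_solution spell dic (solution spell dic)

-- ===== LEMMAS AND PROOFS =====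

-- a flatMap of replicates over a strictly increasing key list is nondecreasing
theorem flatMap_replicate_pairwise (ks : List Char) (m : Char → Nat)
    (h : ks.Pairwise (· < ·)) :
    (ks.flatMap fun c => List.replicate (m c) c).Pairwise (· ≤ ·) := by
  induction ks with
  | nil => simp
  | cons a t ih =>
    rw [List.pairwise_cons] at h
    rw [List.flatMap_cons, List.pairwise_append]
    refine ⟨List.pairwise_replicate.mpr (Or.inr le_rfl), ih h.2, ?_⟩
    intro x hx y hy
    obtain rfl := List.eq_of_mem_replicate hx
    obtain ⟨c, hc, hyc⟩ := List.mem_flatMap.mp hy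
    obtain rfl := List.eq_of_mem_replicate hyc
    exact le_of_lt (h.1 _ hc)

-- multiplicity of each character in the counting-sort expansion
theorem count_flatMap_replicate (ks : List Char) (m : Char → Nat) (hnd : ks.Nodup) (x : Char) :
    (ks.flatMap fun c => List.replicate (m c) c).count x = if x ∈ ks then m x else 0 := by
  induction ks with
  | nil => simp
  | cons a t ih =>
    rw [List.nodup_cons] at hnd
    rw [List.flatMap_cons, List.count_append, List.count_replicate, ih hnd.2]
    by_cases hxa : x = a
    · subst hxa
      simp [hnd.1]
    · simp [hxa, Ne.symm hxa]

-- B's counting sort computes exactly sorted(d)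
theorem pvCanon_eq_sorted (cs : List Char) :
    pvCanon cs = PySem.List.sorted cs (fun c => c) false := by
  have hcnt : pvCount cs = PySem.Dict.counter cs :=
    PySem.Dict.foldl_insert_getD_add_one_eq_counter cs
  have hcanon : pvCanon cs =
      (PySem.List.sorted (PySem.Set.ofList cs) (fun c => c) false).flatMap
        (fun c => List.replicate (cs.count c) c) := by
    simp only [pvCanon, hcnt, PySem.Dict.keys_counter]
    congr 1
    funext c
    rw [PySem.Dict.getD_counter, Int.toNat_natCast]
  set ks := PySem.List.sorted (PySem.Set.ofList cs) (fun c => c) false with hks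
  have hnd : ks.Nodup :=
    ((PySem.List.sorted_perm (PySem.Set.ofList cs) (fun c => c) false).nodup_iff).mpr
      (PySem.Set.nodup_ofList cs)
  have hmem : ∀ x : Char, x ∈ ks ↔ x ∈ cs := by
    intro x
    rw [hks, PySem.List.mem_sorted, PySem.Set.mem_ofList]
  have hperm : (ks.flatMap fun c => List.replicate (cs.count c) c).Perm cs := by
    rw [List.perm_iff_count]
    intro x
    rw [count_flatMap_replicate ks _ hnd x]
    by_cases hx : x ∈ cs
    · rw [if_pos ((hmem x).mpr hx)]
    · rw [if_neg (fun h => hx ((hmem x).mp h)), List.count_eq_zero.mpr hx]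
  have hpw : (ks.flatMap fun c => List.replicate (cs.count c) c).Pairwise (· ≤ ·) :=
    flatMap_replicate_pairwise ks _ (PySem.List.sorted_ofList_pairwise_lt cs)
  rw [hcanon]
  exact (PySem.List.sorted_id_eq_of_perm_of_pairwise cs _ hperm hpw).symm

-- per word: A's sorted-string comparison decides the same as B's length filter + counting sort
theorem pred_eq (T : String) (d : String) :
    (String.ofList (PySem.List.sorted d.toList (fun c => c) false) == T)
      = ((PySem.Str.len d == PySem.List.len T.toList) && (pvCanon d.toList == T.toList)) := by
  rw [pvCanon_eq_sorted]
  by_cases h : PySem.List.sorted d.toList (fun c => c) false = T.toList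
  · have hlen : d.toList.length = T.toList.length := by
      rw [← h, PySem.List.length_sorted]
    have hstr : String.ofList (PySem.List.sorted d.toList (fun c => c) false) = T := by
      rw [h, String.ofList_toList]
    simp [h, PySem.Str.len_eq, PySem.List.len_eq, hlen]
  · have hstr : String.ofList (PySem.List.sorted d.toList (fun c => c) false) ≠ T := by
      intro he
      exact h (by rw [← he, String.toList_ofList])
    rw [beq_eq_false_iff_ne.mpr hstr, beq_eq_false_iff_ne.mpr h, Bool.and_false]

-- A's loop: answer ends as 1 iff some word passes the test
theorem foldl_if_one (dic : List String) (c : String → Bool) :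
    dic.foldl (fun answer d => if c d then 1 else answer) (2 : Int)
      = if dic.any c then 1 else 2 := by
  induction dic with
  | nil => simp
  | cons d rest ih =>
    by_cases h : c d = true
    · simp only [List.foldl_cons, h, List.any_cons, Bool.true_or, if_pos]
      have key : ∀ (l : List String),
          l.foldl (fun answer d => if c d then 1 else answer) (1 : Int) = 1 := by
        intro l
        induction l with
        | nil => rfl
        | cons x xs ihx =>
          simp only [List.foldl_cons]
          by_cases hx : c x = true <;> simp [hx, ihx]
      simp [key rest]
    · simp only [Bool.not_eq_true] at h
      simp [List.foldl_cons, h, List.any_cons, ih]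

-- B's early-return scan, characterised
theorem pvScan_eq_any (T : List Char) (dic : List String) :
    pvScan T dic
      = if dic.any (fun d => (PySem.Str.len d == PySem.List.len T) && (pvCanon d.toList == T))
        then 1 else 2 := by
  induction dic with
  | nil => rfl
  | cons d rest ih =>
    have hlen : (PySem.Str.len d = PySem.List.len T) ↔ d.length = T.length := by
      rw [PySem.Str.len_eq, PySem.List.len_eq, Int.natCast_inj, String.length_toList]
    by_cases h : d.length = T.length
    · by_cases hc : pvCanon d.toList = T <;>
        simp [pvScan, h, hc, ih, PySem.Str.len_eq, PySem.List.len_eq]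
    · simp [pvScan, h, ih, PySem.Str.len_eq, PySem.List.len_eq]

-- ===== VERDICT (by name: the statement is the Claim_ definition above) =====
theorem solution_spec : Claim_equal_solution := by
  intro spell dic _
  unfold Spec_solution solution solution_alt
  set T : String := PySem.Str.join "" (PySem.List.sorted spell (fun x => x) false) with hT
  rw [foldl_if_one dic
    (fun d => (String.ofList (PySem.List.sorted d.toList (fun c => c) false) == T)),
    pvScan_eq_any]
  rw [show (fun d => (String.ofList (PySem.List.sorted d.toList (fun c => c) false) == T))
      = (fun d => (PySem.Str.len d == PySem.List.len T.toList) && (pvCanon d.toList == T.toList))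
    from funext (fun d => pred_eq T d)]
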